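-- pv_equiv track=rewrite | github.com/mecondev/oncutf | main_window.py | _find_consecutive_ranges
-- ===== SOURCE A (Python) =====
-- def _find_consecutive_ranges(indices: list[int]) -> list[tuple[int, int]]:
--     """
--     Given a sorted list of indices, returns a list of (start, end) tuples for consecutive ranges.
--     Example: [1,2,3,7,8,10] -> [(1,3), (7,8), (10,10)]
--     """
--     if not indices:
--         return []
--     ranges = []
--     start = prev = indices[0]
--     for idx in indices[1:]:
--         if idx == prev + 1:
--             prev = idx
--         else:
--             ranges.append((start, prev))
--             start = prev = idx
--     ranges.append((start, prev))
--     return ranges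
-- ===== SOURCE B (Python) =====
-- def _find_consecutive_ranges(indices: list[int]) -> list[tuple[int, int]]:
--     """Given a sorted list of indices, returns (start, end) tuples for consecutive ranges."""
--     if not indices:
--         return []
--     breaks = [(a, b) for a, b in zip(indices, indices[1:]) if b != a + 1]
--     starts = [indices[0]] + [b for _, b in breaks]
--     ends = [a for a, _ in breaks] + [indices[-1]]
--     return list(zip(starts, ends))
-- ===== Notes on version B (the rewrite author's own statement) =====
-- stated objective: alternative
-- what changed: Instead of a stateful loop carrying (start, prev) and appending ranges as it goes, B collects the adjacent break pairs once, builds the starts and ends lists from them, and zips them together.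
import Mathlib
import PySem

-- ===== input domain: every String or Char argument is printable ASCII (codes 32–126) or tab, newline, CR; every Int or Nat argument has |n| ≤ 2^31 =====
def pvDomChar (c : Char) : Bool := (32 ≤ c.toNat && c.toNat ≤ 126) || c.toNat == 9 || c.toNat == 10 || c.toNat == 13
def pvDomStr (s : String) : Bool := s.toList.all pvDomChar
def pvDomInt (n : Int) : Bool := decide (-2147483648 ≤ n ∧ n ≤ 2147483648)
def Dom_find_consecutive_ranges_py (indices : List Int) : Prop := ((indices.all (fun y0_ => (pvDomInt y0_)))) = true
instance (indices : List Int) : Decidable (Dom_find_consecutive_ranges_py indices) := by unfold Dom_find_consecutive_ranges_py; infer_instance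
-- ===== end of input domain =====

-- B replaces A's stateful accumulator loop by collecting break pairs once and zipping starts with ends (alternative decomposition, same cost).


-- ===== PORT A =====
-- A's loop state: (ranges so far, start, prev); one step of the for-loop body
def fcrStep (st : List (Int × Int) × Int × Int) (idx : Int) : List (Int × Int) × Int × Int :=
  if idx = st.2.2 + 1 then (st.1, st.2.1, idx)
  else (st.1 ++ [(st.2.1, st.2.2)], idx, idx)

def find_consecutive_ranges_py (indices : List Int) : List (Int × Int) :=
  match indices with
  | [] => []
  | x :: xs =>
    let r := xs.foldl fcrStep ([], x, x)
    r.1 ++ [(r.2.1, r.2.2)]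

-- ===== PORT B =====
def find_consecutive_ranges_py_alt (indices : List Int) : List (Int × Int) :=
  match indices with
  | [] => []
  | x :: xs =>
    let breaks := (indices.zip xs).filter (fun p => p.2 ≠ p.1 + 1)
    let starts := x :: breaks.map Prod.snd
    let ends := breaks.map Prod.fst ++ [xs.getLastD x]
    starts.zip ends

-- ===== PRECONDITION & SPEC =====
def Spec_find_consecutive_ranges_py (indices : List Int) (out : List (Int × Int)) : Prop := out = find_consecutive_ranges_py_alt indices
instance (indices : List Int) (out : List (Int × Int)) : Decidable (Spec_find_consecutive_ranges_py indices out) := by unfold Spec_find_consecutive_ranges_py; infer_instance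

-- ===== CLAIM (what is proved, stated in full; the proofs are below) =====
def Claim_equal_find_consecutive_ranges_py : Prop := ∀ (indices : List Int), Dom_find_consecutive_ranges_py indices → Spec_find_consecutive_ranges_py indices (find_consecutive_ranges_py indices)

-- ===== LEMMAS AND PROOFS =====

theorem getLastD_cons_irrel (l : List Int) (a d : Int) :
    (a :: l).getLast?.getD d = l.getLast?.getD a := by
  induction l generalizing a d with
  | nil => rfl
  | cons b m ih => rw [List.getLast?_cons_cons, ih, ih b a]

theorem fcr_go (xs : List Int) (acc : List (Int × Int)) (start prev : Int) :
    (xs.foldl fcrStep (acc, start, prev)).1 ++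
      [((xs.foldl fcrStep (acc, start, prev)).2.1, (xs.foldl fcrStep (acc, start, prev)).2.2)] =
    acc ++ (start :: (((prev :: xs).zip xs).filter (fun p => p.2 ≠ p.1 + 1)).map Prod.snd).zip
      ((((prev :: xs).zip xs).filter (fun p => p.2 ≠ p.1 + 1)).map Prod.fst ++ [xs.getLastD prev]) := by
  induction xs generalizing acc start prev with
  | nil => simp [List.foldl]
  | cons idx rest ih =>
    by_cases h : idx = prev + 1
    · simp [List.foldl, fcrStep, h, ih, getLastD_cons_irrel]
    · simp only [List.foldl, fcrStep, if_neg h, List.zip_cons_cons, List.filter_cons]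
      simp only [h, decide_true, not_false_eq_true, decide_not, ne_eq]
      rw [ih]
      simp [List.zip_cons_cons, getLastD_cons_irrel]

theorem find_consecutive_ranges_py_eq (indices : List Int) :
    find_consecutive_ranges_py indices = find_consecutive_ranges_py_alt indices := by
  cases indices with
  | nil => rfl
  | cons x xs =>
    show (xs.foldl fcrStep ([], x, x)).1 ++ _ = _
    rw [fcr_go]
    rfl

-- ===== VERDICT (by name: the statement is the Claim_ definition above) =====
theorem find_consecutive_ranges_py_spec : Claim_equal_find_consecutive_ranges_py := by
  intro indices _
  exact find_consecutive_ranges_py_eq indices
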